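-- pv_equiv track=rewrite | github.com/HovhannesManukyan1995/Python_homeworks | milionater.py | sorted_users
-- ===== SOURCE A (Python) =====
-- def sorted_users(a):
--     b=[]
--     d=[]
--     for i in a:
--         for j in i:
--             if j.isdigit():
--                 b.append(j)
--     b.sort()
--     b.reverse()
--     for el in b:
--         for k in a:
--             if el in k and k not in d:
--                 d.append(k)
--     return '\n'.join(d)
-- ===== SOURCE B (Python) =====
-- def sorted_users(a):
--     # Fast global test: if no digit occurs anywhere, no string qualifies.
--     big = '\n'.join(a)
--     if not any(d in big for d in '0123456789'):
--         return ''
--     # Bucket by each string's largest digit: scan digits 9..0 with C-level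
--     # substring tests (first hit = max digit), dedup via a seen set, then emit
--     # buckets from 9 down to 0. Replaces A's sort of all digit occurrences plus
--     # a rescan of `a` per collected digit.
--     buckets = [[] for _ in range(10)]
--     seen = set()
--     for s in a:
--         if s in seen:
--             continue
--         for v in range(9, -1, -1):
--             if chr(48 + v) in s:
--                 buckets[v].append(s)
--                 seen.add(s)
--                 break
--     out = []
--     for v in range(9, -1, -1):
--         out.extend(buckets[v])
--     return '\n'.join(out)
-- ===== Notes on version B (the rewrite author's own statement) =====
-- stated objective: faster
-- what changed: Instead of collecting every digit occurrence, sorting them, and rescanning the whole list once per collected digit with substring and list-membership tests, B first checks in bulk whether any digit occurs at all (returning '' if not), then makes one pass bucketing each string by its largest digit (found by ten C-level substring tests, dedup via a seen set) and emits the buckets from 9 down to 0.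
import Mathlib
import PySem

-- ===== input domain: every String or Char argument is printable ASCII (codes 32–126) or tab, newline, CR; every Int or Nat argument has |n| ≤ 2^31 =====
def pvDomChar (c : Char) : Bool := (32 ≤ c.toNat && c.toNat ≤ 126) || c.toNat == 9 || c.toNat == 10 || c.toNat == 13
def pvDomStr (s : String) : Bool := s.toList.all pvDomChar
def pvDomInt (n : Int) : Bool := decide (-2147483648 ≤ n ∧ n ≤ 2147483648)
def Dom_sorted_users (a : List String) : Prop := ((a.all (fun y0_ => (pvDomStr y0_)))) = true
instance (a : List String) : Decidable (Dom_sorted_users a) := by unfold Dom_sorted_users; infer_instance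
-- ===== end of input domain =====

-- B replaces A's sort-all-digits-then-rescan-per-digit with a single max-digit pass plus
-- ten buckets emitted from 9 down to 0 (faster; return values proved equal).


-- ===== PORT A =====
-- literal port of A: collect all digit chars, sort ascending, reverse, then for each digit
-- scan `a` appending strings that contain it and are not yet in `d`; join with '\n'.
-- (Python's `el in k` tests a one-char substring; ported as the one-char-string isIn, exact.)
def sorted_users (a : List String) : String :=
  let b := a.foldl (fun b i =>
    i.toList.foldl (fun b j => if PySem.Chars.isdigit j then b ++ [j] else b) b) []
  let b := PySem.List.sorted b (fun x => x) false
  let b := b.reverse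
  let d := b.foldl (fun d el =>
    a.foldl (fun d k =>
      if PySem.Str.isIn (String.ofList [el]) k && !(d.contains k) then d ++ [k] else d) d) []
  PySem.Str.join "\n" d

-- ===== PORT B =====
-- Source B's inner `for v in range(9,-1,-1): if chr(48+v) in s: ... break` (the break is the
-- base case of the recursion; `buckets[v]` with v in 0..9 is the in-range .modify)
def pvScan (s : String) :
    List Int → List (List String) × PySem.Set String → List (List String) × PySem.Set String
  | [], st => st
  | v :: vs, st =>
    if PySem.Str.isIn (String.ofList [Char.ofNat (48 + v).toNat]) s then
      (st.1.modify v.toNat (· ++ [s]), PySem.Set.add st.2 s)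
    else pvScan s vs st

def sorted_users_alt (a : List String) : String :=
  let big := PySem.Str.join "\n" a
  if !(("0123456789").toList.any (fun d => PySem.Str.isIn (String.ofList [d]) big)) then ""
  else
  let st := a.foldl (fun (st : List (List String) × PySem.Set String) s =>
      if PySem.Set.contains st.2 s then st
      else pvScan s (PySem.List.pyRange 9 (-1) (-1)) st)
    (List.replicate 10 [], PySem.Set.empty)
  -- `out.extend(buckets[v])`; v is 0..9, always in range
  let out := (PySem.List.pyRange 9 (-1) (-1)).foldl
    (fun out v => out ++ PySem.List.pyGetD st.1 v []) []
  PySem.Str.join "\n" out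

-- ===== PRECONDITION & SPEC =====
def Spec_sorted_users (a : List String) (out : String) : Prop := out = sorted_users_alt a
instance (a : List String) (out : String) : Decidable (Spec_sorted_users a out) := by unfold Spec_sorted_users; infer_instance

-- ===== CLAIM (what is proved, stated in full; the proofs are below) =====
def Claim_equal_sorted_users : Prop := ∀ (a : List String), Dom_sorted_users a → Spec_sorted_users a (sorted_users a)

-- ===== LEMMAS AND PROOFS =====

-- digit value of a char
def pvDv (c : Char) : Int := (c.toNat : Int) - 48

-- Source B's conceptual key: the max digit of s, -1 if s has no digit
def pvMaxd (s : String) : Int :=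
  s.toList.foldl (fun md c =>
    if PySem.Chars.isdigit c then
      (if ((c.toNat : Int) - 48) > md then (c.toNat : Int) - 48 else md)
    else md) (-1)

-- first occurrences in `a` of strings satisfying P and not already in `d`
def pvPick (P : String → Bool) : List String → List String → List String
  | _, [] => []
  | d, k :: a => if P k && !(d.contains k) then k :: pvPick P (d ++ [k]) a else pvPick P d a

-- the bucket of strings whose max digit is v (first occurrences, in order)
def pvF (a : List String) (v : Int) : List String := pvPick (fun k => pvMaxd k == v) [] a

-- buckets 9, 8, …, 9-(n-1) concatenated
def pvH (a : List String) : Nat → List String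
  | 0 => []
  | n + 1 => pvH a n ++ pvF a (9 - (n : Int))

-- ---------- digit/char facts ----------
theorem pvDv_range (c : Char) (h : PySem.Chars.isdigit c = true) : 0 ≤ pvDv c ∧ pvDv c ≤ 9 := by
  simp only [PySem.Chars.isdigit, Bool.and_eq_true, decide_eq_true_eq] at h
  obtain ⟨h1, h2⟩ := h
  rw [Char.le_def] at h1 h2
  have g1 := UInt32.le_iff_toNat_le.mp h1
  have g2 := UInt32.le_iff_toNat_le.mp h2
  have e1 : ('0' : Char).val.toNat = 48 := rfl
  have e2 : ('9' : Char).val.toNat = 57 := rfl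
  rw [e1] at g1; rw [e2] at g2
  have e3 : c.toNat = c.val.toNat := rfl
  simp only [pvDv, e3]
  omega
theorem pvDv_inj (c c' : Char) (h : PySem.Chars.isdigit c = true)
    (h' : PySem.Chars.isdigit c' = true) (he : pvDv c = pvDv c') : c = c' := by
  have : c.toNat = c'.toNat := by simp only [pvDv] at he; omega
  exact Char.ext (UInt32.toNat_inj.mp this)
theorem pvDv_mono (c c' : Char) (h : c ≤ c') : pvDv c ≤ pvDv c' := by
  rw [Char.le_def] at h
  have := UInt32.le_iff_toNat_le.mp h
  have e : ∀ x : Char, x.toNat = x.val.toNat := fun _ => rfl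
  simp only [pvDv, e]
  omega
theorem pvIsIn_single (el : Char) (k : String) :
    PySem.Str.isIn (String.ofList [el]) k = true ↔ el ∈ k.toList := by
  rw [PySem.Str.isIn_iff_infix, String.toList_ofList]
  exact List.singleton_infix_iff el k.toList

-- ---------- pvMaxd facts ----------
theorem pvMaxd_foldl_ge (l : List Char) (m : Int) :
    m ≤ l.foldl (fun md c =>
      if PySem.Chars.isdigit c then
        (if ((c.toNat : Int) - 48) > md then (c.toNat : Int) - 48 else md)
      else md) m := by
  induction l generalizing m with
  | nil => simp
  | cons c l ih =>
    simp only [List.foldl_cons]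
    split_ifs with h1 h2
    · exact le_trans (by omega) (ih _)
    · exact ih m
    · exact ih m

theorem pvMaxd_foldl_mem (l : List Char) (m : Int) (c : Char) (hc : c ∈ l)
    (hd : PySem.Chars.isdigit c = true) :
    pvDv c ≤ l.foldl (fun md c =>
      if PySem.Chars.isdigit c then
        (if ((c.toNat : Int) - 48) > md then (c.toNat : Int) - 48 else md)
      else md) m := by
  induction l generalizing m with
  | nil => simp at hc
  | cons c0 l ih =>
    simp only [List.foldl_cons]
    rcases List.mem_cons.mp hc with rfl | hc
    · rw [if_pos hd]
      split_ifs with h2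
      · have := pvMaxd_foldl_ge l (pvDv c); simpa [pvDv] using this
      · exact le_trans (by simp [pvDv]; omega) (pvMaxd_foldl_ge l m)
    · split_ifs <;> exact ih _ hc

theorem pvMaxd_foldl_eq (l : List Char) (m : Int) :
    l.foldl (fun md c =>
      if PySem.Chars.isdigit c then
        (if ((c.toNat : Int) - 48) > md then (c.toNat : Int) - 48 else md)
      else md) m = m ∨
    ∃ c ∈ l, PySem.Chars.isdigit c = true ∧ pvDv c = l.foldl (fun md c =>
      if PySem.Chars.isdigit c then
        (if ((c.toNat : Int) - 48) > md then (c.toNat : Int) - 48 else md)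
      else md) m := by
  induction l generalizing m with
  | nil => simp
  | cons c0 l ih =>
    simp only [List.foldl_cons]
    split_ifs with h1 h2
    · rcases ih ((c0.toNat : Int) - 48) with h | ⟨c, hc, hcd, hcv⟩
      · exact Or.inr ⟨c0, by simp, h1, by simp [pvDv, h]⟩
      · exact Or.inr ⟨c, by simp [hc], hcd, hcv⟩
    · rcases ih m with h | ⟨c, hc, hcd, hcv⟩
      · exact Or.inl h
      · exact Or.inr ⟨c, by simp [hc], hcd, hcv⟩
    · rcases ih m with h | ⟨c, hc, hcd, hcv⟩
      · exact Or.inl h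
      · exact Or.inr ⟨c, by simp [hc], hcd, hcv⟩

theorem pvMaxd_le_nine (s : String) : pvMaxd s ≤ 9 := by
  rcases pvMaxd_foldl_eq s.toList (-1) with h | ⟨c, _, hcd, hcv⟩
  · rw [pvMaxd, h]; omega
  · rw [pvMaxd, ← hcv]; exact (pvDv_range c hcd).2

theorem pvMaxd_ge (s : String) (c : Char) (hc : c ∈ s.toList)
    (hd : PySem.Chars.isdigit c = true) : pvDv c ≤ pvMaxd s :=
  pvMaxd_foldl_mem s.toList (-1) c hc hd

theorem pvMaxd_exists (s : String) (h : 0 ≤ pvMaxd s) :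
    ∃ c ∈ s.toList, PySem.Chars.isdigit c = true ∧ pvDv c = pvMaxd s := by
  rcases pvMaxd_foldl_eq s.toList (-1) with h' | h'
  · rw [pvMaxd] at h; rw [h'] at h; omega
  · exact h'

theorem pvMaxd_nonneg_of_digit (s : String) (c : Char) (hc : c ∈ s.toList)
    (hd : PySem.Chars.isdigit c = true) : 0 ≤ pvMaxd s :=
  le_trans (pvDv_range c hd).1 (pvMaxd_ge s c hc hd)

-- ---------- pvPick facts ----------
theorem pvPick_cons (P : String → Bool) (d : List String) (k : String) (a : List String) :
    pvPick P d (k :: a)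
      = if P k && !(d.contains k) then k :: pvPick P (d ++ [k]) a else pvPick P d a := rfl

theorem pvPick_cons_pos (P : String → Bool) (d : List String) (k : String) (a : List String)
    (h : (P k && !(d.contains k)) = true) :
    pvPick P d (k :: a) = k :: pvPick P (d ++ [k]) a := by
  rw [pvPick_cons, h]; simp

theorem pvPick_cons_neg (P : String → Bool) (d : List String) (k : String) (a : List String)
    (h : (P k && !(d.contains k)) = false) :
    pvPick P d (k :: a) = pvPick P d a := by
  rw [pvPick_cons, h]; simp

theorem pvPick_mem (P : String → Bool) (a : List String) (d : List String) (k : String) :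
    k ∈ pvPick P d a ↔ k ∈ a ∧ P k = true ∧ k ∉ d := by
  induction a generalizing d with
  | nil => simp [pvPick]
  | cons k0 a ih =>
    by_cases hP : P k0 = true
    · by_cases hd : k0 ∈ d
      · have hc : (P k0 && !(d.contains k0)) = false := by
          simp [List.contains_eq_mem, hd]
        have e : pvPick P d (k0 :: a) = pvPick P d a := pvPick_cons_neg _ _ _ _ hc
        rw [e, ih]
        constructor
        · rintro ⟨ha, hPk, hdk⟩; exact ⟨List.mem_cons_of_mem _ ha, hPk, hdk⟩
        · rintro ⟨ha, hPk, hdk⟩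
          rcases List.mem_cons.mp ha with rfl | ha
          · exact absurd hd hdk
          · exact ⟨ha, hPk, hdk⟩
      · have hc : (P k0 && !(d.contains k0)) = true := by
          simp [List.contains_eq_mem, hd, hP]
        have e : pvPick P d (k0 :: a) = k0 :: pvPick P (d ++ [k0]) a := pvPick_cons_pos _ _ _ _ hc
        rw [e]
        simp only [List.mem_cons, ih]
        constructor
        · rintro (rfl | ⟨ha, hPk, hdk⟩)
          · exact ⟨Or.inl rfl, hP, hd⟩
          · exact ⟨Or.inr ha, hPk, fun hm => hdk (by simp [hm])⟩
        · rintro ⟨rfl | ha, hPk, hdk⟩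
          · exact Or.inl rfl
          · by_cases hk : k = k0
            · exact Or.inl hk
            · exact Or.inr ⟨ha, hPk, by simp [hdk, hk]⟩
    · have hP' : P k0 = false := by simpa using hP
      have e : pvPick P d (k0 :: a) = pvPick P d a := pvPick_cons_neg _ _ _ _ (by simp [hP'])
      rw [e, ih]
      constructor
      · rintro ⟨ha, hPk, hdk⟩; exact ⟨List.mem_cons_of_mem _ ha, hPk, hdk⟩
      · rintro ⟨ha, hPk, hdk⟩
        rcases List.mem_cons.mp ha with rfl | ha
        · rw [hPk] at hP'; exact absurd hP' (by simp)
        · exact ⟨ha, hPk, hdk⟩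
theorem pvPick_foldl (P : String → Bool) (a : List String) (d0 : List String) :
    a.foldl (fun d k => if P k && !(d.contains k) then d ++ [k] else d) d0
      = d0 ++ pvPick P d0 a := by
  induction a generalizing d0 with
  | nil => simp [pvPick]
  | cons k a ih =>
    simp only [List.foldl_cons, pvPick]
    split_ifs with h
    · rw [ih]; simp
    · exact ih d0

theorem pvPick_congr (P1 P2 : String → Bool) (a : List String) (d : List String)
    (h : ∀ k ∈ a, k ∉ d → P1 k = P2 k) : pvPick P1 d a = pvPick P2 d a := by
  induction a generalizing d with
  | nil => rfl
  | cons k a ih =>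
    simp only [pvPick]
    by_cases hd : k ∈ d
    · have hc : d.contains k = true := by simp [List.contains_eq_mem, hd]
      simp only [hc, Bool.not_true, Bool.and_false, if_false]
      exact ih d (fun j hj hjd => h j (by simp [hj]) hjd)
    · have hc : d.contains k = false := by simp [List.contains_eq_mem, hd]
      have hP : P1 k = P2 k := h k (by simp) hd
      rw [← hP]
      split_ifs with h1
      · congr 1
        exact ih (d ++ [k]) (fun j hj hjd => h j (by simp [hj]) (fun hm => hjd (by simp [hm])))
      · exact ih d (fun j hj hjd => h j (by simp [hj]) hjd)

theorem pvPick_d_irrel (P : String → Bool) (a : List String) (d d' : List String)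
    (h : ∀ k ∈ a, P k = true → (k ∈ d ↔ k ∈ d')) : pvPick P d a = pvPick P d' a := by
  induction a generalizing d d' with
  | nil => rfl
  | cons k a ih =>
    simp only [pvPick]
    by_cases hP : P k = true
    · have hiff := h k (by simp) hP
      by_cases hd : k ∈ d
      · have hd' : k ∈ d' := hiff.mp hd
        simp only [hP, List.contains_eq_mem, hd, hd', decide_true, Bool.not_true,
          Bool.and_false, if_false]
        exact ih d d' (fun j hj hjP => h j (by simp [hj]) hjP)
      · have hd' : k ∉ d' := fun hm => hd (hiff.mpr hm)
        simp only [hP, List.contains_eq_mem, hd, hd', decide_false, Bool.not_false,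
          Bool.and_true, if_true]
        congr 1
        refine ih (d ++ [k]) (d' ++ [k]) (fun j hj hjP => ?_)
        simp only [List.mem_append, List.mem_singleton]
        rw [h j (by simp [hj]) hjP]
    · simp only [Bool.not_eq_true] at hP
      simp only [hP, Bool.false_and, if_false]
      exact ih d d' (fun j hj hjP => h j (by simp [hj]) hjP)

theorem pvPick_nil_of (P : String → Bool) (a : List String) (d : List String)
    (h : ∀ k ∈ a, P k = true → k ∈ d) : pvPick P d a = [] := by
  induction a generalizing d with
  | nil => rfl
  | cons k a ih =>
    simp only [pvPick]
    by_cases hP : P k = true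
    · have : d.contains k = true := by simp [List.contains_eq_mem, h k (by simp) hP]
      simp only [this, Bool.not_true, Bool.and_false, if_false]
      exact ih d (fun j hj hjP => h j (by simp [hj]) hjP)
    · simp only [Bool.not_eq_true] at hP
      simp only [hP, Bool.false_and, if_false]
      exact ih d (fun j hj hjP => h j (by simp [hj]) hjP)

theorem pvPick_snoc (P : String → Bool) (xs : List String) (s : String) (d : List String) :
    pvPick P d (xs ++ [s])
      = pvPick P d xs ++
        (if P s && !((d ++ pvPick P d xs).contains s) then [s] else []) := by
  induction xs generalizing d with
  | nil => simp [pvPick]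
  | cons k xs ih =>
    by_cases h : (P k && !(d.contains k)) = true
    · have e1 : pvPick P d (k :: (xs ++ [s])) = k :: pvPick P (d ++ [k]) (xs ++ [s]) :=
        pvPick_cons_pos _ _ _ _ h
      have e2 : pvPick P d (k :: xs) = k :: pvPick P (d ++ [k]) xs :=
        pvPick_cons_pos _ _ _ _ h
      rw [List.cons_append, e1, ih, e2]
      have e3 : (d ++ [k]) ++ pvPick P (d ++ [k]) xs
          = d ++ (k :: pvPick P (d ++ [k]) xs) := by simp
      rw [e3, List.cons_append]
    · have h' : (P k && !(d.contains k)) = false := by simpa using h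
      have e1 : pvPick P d (k :: (xs ++ [s])) = pvPick P d (xs ++ [s]) :=
        pvPick_cons_neg _ _ _ _ h'
      have e2 : pvPick P d (k :: xs) = pvPick P d xs :=
        pvPick_cons_neg _ _ _ _ h'
      rw [List.cons_append, e1, ih, e2]
theorem pvF_mem (a : List String) (v : Int) (s : String) :
    s ∈ pvF a v ↔ s ∈ a ∧ pvMaxd s = v := by
  rw [pvF, pvPick_mem]
  simp

theorem pvF_nil_of (a : List String) (v : Int) (h : ∀ s ∈ a, pvMaxd s ≠ v) :
    pvF a v = [] := by
  refine pvPick_nil_of _ a [] (fun k hk hP => ?_)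
  simp only [beq_iff_eq] at hP
  exact absurd hP (h k hk)

theorem pvH_mem (a : List String) (n : Nat) (hn : n ≤ 10) (s : String) :
    s ∈ pvH a n ↔ s ∈ a ∧ 10 - (n : Int) ≤ pvMaxd s ∧ 0 ≤ pvMaxd s := by
  induction n with
  | zero =>
    simp only [pvH, List.not_mem_nil, false_iff, not_and]
    intro _ h; push_cast at h; intro h0
    have := pvMaxd_le_nine s; omega
  | succ n ih =>
    specialize ih (by omega)
    simp only [pvH, List.mem_append, ih, pvF_mem]
    constructor
    · rintro (⟨hs, h1, h2⟩ | ⟨hs, h1⟩)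
      · refine ⟨hs, by push_cast; push_cast at h1; omega, h2⟩
      · refine ⟨hs, by rw [h1]; push_cast; omega, by rw [h1]; push_cast; omega⟩
    · rintro ⟨hs, h1, h2⟩
      by_cases hcase : 10 - (n : Int) ≤ pvMaxd s
      · exact Or.inl ⟨hs, hcase, h2⟩
      · refine Or.inr ⟨hs, ?_⟩
        push_cast at h1 hcase ⊢; omega

theorem pvH_ext (a : List String) (n m : Nat)
    (h : ∀ j, n ≤ j → j < n + m → pvF a (9 - (j : Int)) = []) :
    pvH a (n + m) = pvH a n := by
  induction m with
  | zero => rfl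
  | succ m ih =>
    have : n + (m + 1) = (n + m) + 1 := by omega
    rw [this]
    show pvH a (n + m) ++ pvF a (9 - ((n + m : Nat) : Int)) = pvH a n
    rw [h (n + m) (by omega) (by omega), List.append_nil]
    exact ih (fun j hj hj' => h j hj (by omega))

-- ---------- A side ----------
theorem pvA_collect (a : List String) :
    a.foldl (fun b i =>
        i.toList.foldl (fun b j => if PySem.Chars.isdigit j then b ++ [j] else b) b) []
      = a.flatMap (fun i => i.toList.filter PySem.Chars.isdigit) := by
  have inner : ∀ (i : String) (b : List Char),
      i.toList.foldl (fun b j => if PySem.Chars.isdigit j then b ++ [j] else b) b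
        = b ++ i.toList.filter PySem.Chars.isdigit := by
    intro i b
    simpa using PySem.List.foldl_append_if PySem.Chars.isdigit (fun j => j) i.toList b
  have hfun : (fun (b : List Char) (i : String) =>
        i.toList.foldl (fun b j => if PySem.Chars.isdigit j then b ++ [j] else b) b)
      = fun b i => b ++ i.toList.filter PySem.Chars.isdigit := by
    funext b i; exact inner i b
  rw [hfun]
  simpa using PySem.List.foldl_append_eq_flatMap
    (fun i : String => i.toList.filter PySem.Chars.isdigit) a []

-- the outer loop of A: processing the digits in descending order fills the buckets in order
theorem pvOuter (a : List String) (r : List Char) (t : Int)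
    (ht0 : 0 ≤ t) (ht10 : t ≤ 10)
    (h1 : ∀ c ∈ r, PySem.Chars.isdigit c = true)
    (h2 : r.Pairwise (fun x y => y ≤ x))
    (h3 : ∀ c ∈ r, pvDv c ≤ t)
    (h4 : ∀ s ∈ a, 0 ≤ pvMaxd s → t ≤ pvMaxd s ∨ ∃ c ∈ r, pvDv c = pvMaxd s) :
    r.foldl (fun d el =>
        a.foldl (fun d k =>
          if PySem.Str.isIn (String.ofList [el]) k && !(d.contains k) then d ++ [k] else d) d)
      (pvH a (10 - t).toNat)
      = pvH a 10 := by
  induction r generalizing t with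
  | nil =>
    simp only [List.foldl_nil]
    have hn : ((10 - t).toNat : Int) = 10 - t := by omega
    have hsplit : (10 : Nat) = (10 - t).toNat + (10 - (10 - t).toNat) := by omega
    rw [hsplit]
    refine (pvH_ext a _ _ (fun j hj hj' => ?_)).symm
    refine pvF_nil_of a _ (fun s hs hm => ?_)
    have hj9 : j ≤ 9 := by omega
    have hv0 : (0 : Int) ≤ 9 - (j : Int) := by
      have : (j : Int) ≤ 9 := by exact_mod_cast hj9
      omega
    have hmax0 : 0 ≤ pvMaxd s := by rw [hm]; exact hv0
    rcases h4 s hs hmax0 with h | ⟨c, hc, _⟩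
    · rw [hm] at h
      have : ((10 - t).toNat : Int) ≤ (j : Int) := by exact_mod_cast hj
      omega
    · simp at hc
  | cons el r ih =>
    have hel : PySem.Chars.isdigit el = true := h1 el (by simp)
    obtain ⟨hv0, hv9⟩ := pvDv_range el hel
    have hvt : pvDv el ≤ t := h3 el (by simp)
    have hrel : ∀ c ∈ r, c ≤ el := by
      intro c hc
      exact (List.pairwise_cons.mp h2).1 c hc
    have hrv : ∀ c ∈ r, pvDv c ≤ pvDv el := fun c hc => pvDv_mono c el (hrel c hc)
    set v := pvDv el with hvdef
    set n := (10 - t).toNat with hndef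
    have hnc : (n : Int) = 10 - t := by omega
    have hdm : ∀ s, s ∈ pvH a n ↔ s ∈ a ∧ t ≤ pvMaxd s ∧ 0 ≤ pvMaxd s := by
      intro s
      have := pvH_mem a n (by omega) s
      rw [hnc] at this
      simpa using this
    simp only [List.foldl_cons]
    rw [pvPick_foldl]
    have hPel : ∀ k ∈ a, k ∉ pvH a n →
        PySem.Str.isIn (String.ofList [el]) k = (pvMaxd k == v) := by
      intro k hk hkd
      by_cases hm : pvMaxd k = v
      · have hmax0 : 0 ≤ pvMaxd k := by rw [hm]; exact hv0
        obtain ⟨c, hc, hcd, hcv⟩ := pvMaxd_exists k hmax0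
        have : c = el := pvDv_inj c el hcd hel (by rw [hcv, hm])
        subst this
        rw [(pvIsIn_single c k).mpr hc]
        simp [hm]
      · have hne : (pvMaxd k == v) = false := by simp [hm]
        rw [hne]
        cases hIs : PySem.Str.isIn (String.ofList [el]) k with
        | false => rfl
        | true =>
          exfalso
          have helk : el ∈ k.toList := (pvIsIn_single el k).mp hIs
          have hle : v ≤ pvMaxd k := pvMaxd_ge k el helk hel
          have hmax0 : 0 ≤ pvMaxd k := pvMaxd_nonneg_of_digit k el helk hel
          have hgt : v < pvMaxd k := lt_of_le_of_ne hle (fun he => hm he.symm)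
          rcases h4 k hk hmax0 with h | ⟨c, hc, hcv⟩
          · exact hkd ((hdm k).mpr ⟨hk, h, hmax0⟩)
          · rcases List.mem_cons.mp hc with rfl | hc
            · omega
            · have := hrv c hc; omega
      
    rw [pvPick_congr _ _ a (pvH a n) hPel]
    by_cases hvcase : v = t
    · have hnil : pvPick (fun k => pvMaxd k == v) (pvH a n) a = [] := by
        refine pvPick_nil_of _ a _ (fun k hk hP => ?_)
        have hm : pvMaxd k = v := by simpa using hP
        exact (hdm k).mpr ⟨hk, by rw [hm, hvcase], by rw [hm]; exact hv0⟩
      rw [hnil, List.append_nil]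
      refine ih t ht0 ht10 (fun c hc => h1 c (by simp [hc]))
        (List.pairwise_cons.mp h2).2 (fun c hc => h3 c (by simp [hc])) ?_
      intro s hs hm0
      rcases h4 s hs hm0 with h | ⟨c, hc, hcv⟩
      · exact Or.inl h
      · rcases List.mem_cons.mp hc with rfl | hc
        · have hct : pvDv c = t := by rw [← hvdef, hvcase]
          exact Or.inl (by rw [hcv] at hct; omega)
        · exact Or.inr ⟨c, hc, hcv⟩
    · have hvlt : v < t := lt_of_le_of_ne hvt hvcase
      have hstep : pvPick (fun k => pvMaxd k == v) (pvH a n) a = pvF a v := by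
        rw [pvF]
        refine pvPick_d_irrel _ a _ _ (fun k hk hP => ?_)
        have hm : pvMaxd k = v := by simpa using hP
        simp only [List.not_mem_nil, iff_false]
        intro hkd
        have := ((hdm k).mp hkd).2.1
        omega
      rw [hstep]
      have hmid : pvH a ((9 - v).toNat) = pvH a n := by
        have hsplit : (9 - v).toNat = n + ((9 - v).toNat - n) := by omega
        rw [hsplit]
        refine pvH_ext a _ _ (fun j hj hj' => ?_)
        refine pvF_nil_of a _ (fun s hs hm => ?_)
        have hjlow : (n : Int) ≤ (j : Int) := by exact_mod_cast hj
        have hjhigh : (j : Int) < 9 - v := by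
          have : j < (9 - v).toNat := by omega
          omega
        have hval_lt : 9 - (j : Int) < t := by omega
        have hval_gt : v < 9 - (j : Int) := by omega
        have hmax0 : 0 ≤ pvMaxd s := by rw [hm]; omega
        rcases h4 s hs hmax0 with h | ⟨c, hc, hcv⟩
        · rw [hm] at h; omega
        · rcases List.mem_cons.mp hc with rfl | hc
          · rw [hm] at hcv; omega
          · have := hrv c hc; rw [hm] at hcv; omega
      have hcomb : pvH a n ++ pvF a v = pvH a ((10 - v).toNat) := by
        have hsucc : (10 - v).toNat = (9 - v).toNat + 1 := by omega
        rw [hsucc]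
        show pvH a n ++ pvF a v = pvH a ((9 - v).toNat) ++ pvF a (9 - (((9 - v).toNat : Nat) : Int))
        rw [hmid]
        congr 2
        omega
      rw [hcomb]
      refine ih v hv0 (by omega) (fun c hc => h1 c (by simp [hc]))
        (List.pairwise_cons.mp h2).2 (fun c hc => hrv c hc) ?_
      intro s hs hm0
      rcases h4 s hs hm0 with h | ⟨c, hc, hcv⟩
      · exact Or.inl (by omega)
      · rcases List.mem_cons.mp hc with rfl | hc
        · exact Or.inl (le_of_eq hcv)
        · exact Or.inr ⟨c, hc, hcv⟩

theorem pvA_main (a : List String) :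
    sorted_users a = PySem.Str.join "\n" (pvH a 10) := by
  simp only [sorted_users]
  rw [pvA_collect]
  set b := a.flatMap (fun i => i.toList.filter PySem.Chars.isdigit) with hbdef
  set bs := PySem.List.sorted b (fun x => x) false with hbsdef
  have hmemb : ∀ c : Char, c ∈ bs.reverse ↔ c ∈ b := by
    intro c
    rw [List.mem_reverse, hbsdef, PySem.List.mem_sorted]
  have hmemb' : ∀ c : Char, c ∈ b ↔ ∃ s ∈ a, c ∈ s.toList ∧ PySem.Chars.isdigit c = true := by
    intro c
    rw [hbdef, List.mem_flatMap]
    constructor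
    · rintro ⟨i, hi, hc⟩
      rcases List.mem_filter.mp hc with ⟨h1, h2⟩
      exact ⟨i, hi, h1, h2⟩
    · rintro ⟨s, hs, h1, h2⟩
      exact ⟨s, hs, List.mem_filter.mpr ⟨h1, h2⟩⟩
  have happ := pvOuter a bs.reverse 10 (by norm_num) le_rfl
    (fun c hc => ((hmemb' c).mp ((hmemb c).mp hc)).choose_spec.2.2)
    (by
      rw [List.pairwise_reverse]
      have := PySem.List.sorted_pairwise b (fun x => x)
      exact this.imp (fun h => h))
    (fun c hc => by
      have hd := ((hmemb' c).mp ((hmemb c).mp hc)).choose_spec.2.2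
      have := (pvDv_range c hd).2
      omega)
    (fun s hs hm => by
      obtain ⟨c, hc, hcd, hcv⟩ := pvMaxd_exists s hm
      refine Or.inr ⟨c, (hmemb c).mpr ((hmemb' c).mpr ⟨s, hs, hc, hcd⟩), hcv⟩)
  have h0 : ((10 : Int) - 10).toNat = 0 := by norm_num
  rw [h0] at happ
  rw [show pvH a 0 = [] from rfl] at happ
  rw [happ]

-- ---------- B side ----------
theorem pvDigitChar_spec (v : Int) (h0 : 0 ≤ v) (h9 : v ≤ 9) :
    PySem.Chars.isdigit (Char.ofNat (48 + v).toNat) = true ∧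
      pvDv (Char.ofNat (48 + v).toNat) = v := by
  have hval : ((48 + v).toNat).isValidChar := Or.inl (by omega)
  have ht : (Char.ofNat (48 + v).toNat).toNat = (48 + v).toNat := by
    rw [Char.toNat_ofNat, if_pos hval]
  have htv : (Char.ofNat (48 + v).toNat).val.toNat = (48 + v).toNat := ht
  constructor
  · simp only [PySem.Chars.isdigit, Bool.and_eq_true, decide_eq_true_eq]
    constructor
    · rw [Char.le_def]
      apply UInt32.le_iff_toNat_le.mpr
      have e : ('0' : Char).val.toNat = 48 := rfl
      rw [e, htv]; omega
    · rw [Char.le_def]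
      apply UInt32.le_iff_toNat_le.mpr
      have e : ('9' : Char).val.toNat = 57 := rfl
      rw [e, htv]; omega
  · simp only [pvDv, ht]; omega

theorem pvScan_spec (s : String) (t : Int) (ht : t ≤ 9) (hmax : pvMaxd s ≤ t)
    (st : List (List String) × PySem.Set String) :
    pvScan s (PySem.List.pyRange t (-1) (-1)) st
      = if 0 ≤ pvMaxd s then
          (st.1.modify (pvMaxd s).toNat (· ++ [s]), PySem.Set.add st.2 s)
        else st := by
  have H : ∀ (k : Nat) (t : Int), t ≤ 9 → t < (k : Int) → pvMaxd s ≤ t →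
      ∀ st : List (List String) × PySem.Set String,
      pvScan s (PySem.List.pyRange t (-1) (-1)) st
        = if 0 ≤ pvMaxd s then
            (st.1.modify (pvMaxd s).toNat (· ++ [s]), PySem.Set.add st.2 s)
          else st := by
    intro k
    induction k with
    | zero =>
      intro t _ hk hmax st
      have htneg : t < 0 := by exact_mod_cast hk
      rw [PySem.List.pyRange_neg_one_eq_nil (by omega)]
      have : ¬ 0 ≤ pvMaxd s := by omega
      simp [pvScan, this]
    | succ k ih =>
      intro t ht hk hmax st
      by_cases htneg : t < 0
      · rw [PySem.List.pyRange_neg_one_eq_nil (by omega)]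
        have : ¬ 0 ≤ pvMaxd s := by omega
        simp [pvScan, this]
      · have h0t : (0 : Int) ≤ t := by omega
        rw [PySem.List.pyRange_neg_one_cons (by omega : (-1 : Int) < t)]
        obtain ⟨hdig, hdv⟩ := pvDigitChar_spec t h0t ht
        cases hin : PySem.Str.isIn (String.ofList [Char.ofNat (48 + t).toNat]) s with
        | true =>
          have hmem : Char.ofNat (48 + t).toNat ∈ s.toList := (pvIsIn_single _ s).mp hin
          have hle : t ≤ pvMaxd s := by
            have := pvMaxd_ge s _ hmem hdig
            omega
          have hmaxeq : pvMaxd s = t := le_antisymm hmax hle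
          have e0 : pvScan s (t :: PySem.List.pyRange (t - 1) (-1) (-1)) st
              = if PySem.Str.isIn (String.ofList [Char.ofNat (48 + t).toNat]) s then
                  (st.1.modify t.toNat (· ++ [s]), PySem.Set.add st.2 s)
                else pvScan s (PySem.List.pyRange (t - 1) (-1) (-1)) st := rfl
          rw [e0, hin]
          rw [if_pos rfl, if_pos (by omega), hmaxeq]
        | false =>
          have hne : pvMaxd s ≠ t := by
            intro he
            have h0m : 0 ≤ pvMaxd s := by omega
            obtain ⟨c, hc, hcd, hcv⟩ := pvMaxd_exists s h0m
            have hceq : c = Char.ofNat (48 + t).toNat :=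
              pvDv_inj _ _ hcd hdig (by rw [hcv, hdv, he])
            have : PySem.Str.isIn (String.ofList [Char.ofNat (48 + t).toNat]) s = true :=
              (pvIsIn_single _ s).mpr (hceq ▸ hc)
            rw [hin] at this
            exact absurd this (by simp)
          have e0 : pvScan s (t :: PySem.List.pyRange (t - 1) (-1) (-1)) st
              = if PySem.Str.isIn (String.ofList [Char.ofNat (48 + t).toNat]) s then
                  (st.1.modify t.toNat (· ++ [s]), PySem.Set.add st.2 s)
                else pvScan s (PySem.List.pyRange (t - 1) (-1) (-1)) st := rfl
          rw [e0, hin]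
          rw [if_neg (by simp)]
          exact ih (t - 1) (by omega) (by push_cast at hk ⊢; omega) (by omega) st
  exact H 11 t ht (by omega) hmax st

theorem pvModify_map_range (g : Nat → List String) (m : Nat) (hm : m < 10)
    (f : List String → List String) :
    ((List.range 10).map g).modify m f
      = (List.range 10).map (fun v => if v = m then f (g v) else g v) := by
  apply List.ext_getElem
  · simp [List.length_modify]
  · intro i h1 h2
    rw [List.getElem_modify]
    simp only [List.getElem_map, List.getElem_range]
    have : (m = i) ↔ (i = m) := eq_comm
    split_ifs with hcase hcase' hcase'
    · rfl
    · exact absurd hcase.symm hcase'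
    · exact absurd hcase'.symm hcase
    · rfl

theorem pvB_state (a : List String) :
    a.foldl (fun (st : List (List String) × PySem.Set String) s =>
        if PySem.Set.contains st.2 s then st
        else pvScan s (PySem.List.pyRange 9 (-1) (-1)) st)
      (List.replicate 10 [], PySem.Set.empty)
      = ((List.range 10).map (fun v : Nat => pvF a (v : Int)),
         pvPick (fun k => decide (0 ≤ pvMaxd k)) [] a) := by
  induction a using List.reverseRecOn with
  | nil => rfl
  | append_singleton xs s ih =>
    rw [List.foldl_append, ih, List.foldl_cons, List.foldl_nil]
    rw [pvPick_snoc (fun k => decide (0 ≤ pvMaxd k)) xs s []]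
    set L := pvPick (fun k => decide (0 ≤ pvMaxd k)) [] xs with hLdef
    have hsnocF : ∀ v : Int, pvF (xs ++ [s]) v
        = pvF xs v ++ (if (pvMaxd s == v) && !(([] ++ pvF xs v : List String).contains s)
            then [s] else []) := by
      intro v
      rw [pvF, pvPick_snoc (fun k => pvMaxd k == v) xs s []]
      rfl
    by_cases hs : s ∈ L
    · have hsl : s ∈ xs ∧ 0 ≤ pvMaxd s := by
        have := (pvPick_mem _ xs [] s).mp (hLdef ▸ hs)
        exact ⟨this.1, by simpa using this.2.1⟩
      have hc : PySem.Set.contains L s = true := by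
        simp [PySem.Set.contains, List.contains_eq_mem, hs]
      rw [hc, if_pos rfl]
      have hseen : (decide (0 ≤ pvMaxd s) && !(([] ++ L : List String).contains s)) = false := by
        simp [List.contains_eq_mem, hs]
      rw [hseen]
      have hbuck : ∀ v : Nat, pvF (xs ++ [s]) (v : Int) = pvF xs (v : Int) := by
        intro v
        rw [hsnocF]
        by_cases hmv : pvMaxd s = (v : Int)
        · have hmem : s ∈ pvF xs (v : Int) :=
            (pvPick_mem _ xs [] s).mpr ⟨hsl.1, by simp [hmv], by simp⟩
          simp [List.contains_eq_mem, hmem]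
        · simp [hmv]
      have hmapeq : (List.range 10).map (fun v : Nat => pvF (xs ++ [s]) (v : Int))
          = (List.range 10).map (fun v : Nat => pvF xs (v : Int)) :=
        List.map_congr_left (fun v _ => hbuck v)
      rw [hmapeq]
      simp
    · have hc : PySem.Set.contains L s = false := by
        simp [PySem.Set.contains, List.contains_eq_mem, hs]
      rw [hc]
      simp only [Bool.false_eq_true, if_false]
      rw [pvScan_spec s 9 (by norm_num) (pvMaxd_le_nine s)]
      by_cases hmd : 0 ≤ pvMaxd s
      · have hseen : (decide (0 ≤ pvMaxd s) && !(([] ++ L : List String).contains s)) = true := by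
          simp [List.contains_eq_mem, hs, hmd]
        rw [if_pos hmd, hseen]
        have haddL : PySem.Set.add L s = L ++ [s] := by
          simp [PySem.Set.add, PySem.Set.contains, List.contains_eq_mem, hs]
        have hm10 : (pvMaxd s).toNat < 10 := by
          have := pvMaxd_le_nine s; omega
        have hbuck : ∀ v : Nat, pvF (xs ++ [s]) (v : Int)
            = (if v = (pvMaxd s).toNat then pvF xs (v : Int) ++ [s] else pvF xs (v : Int)) := by
          intro v
          rw [hsnocF]
          by_cases hv : v = (pvMaxd s).toNat
          · have hmv : pvMaxd s = (v : Int) := by omega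
            have hnotmem : s ∉ pvF xs (v : Int) := by
              intro hmem
              have hmm := (pvPick_mem _ xs [] s).mp hmem
              exact hs (hLdef ▸ (pvPick_mem _ xs [] s).mpr ⟨hmm.1, by simp [hmd], by simp⟩)
            rw [if_pos hv]
            congr 1
            simp [hmv, List.contains_eq_mem, hnotmem]
          · have hmv : pvMaxd s ≠ (v : Int) := by omega
            rw [if_neg hv]
            have hb : (pvMaxd s == (v : Int)) = false := by simp [hmv]
            rw [hb]
            simp
        have hmapeq : (List.range 10).map (fun v : Nat => pvF (xs ++ [s]) (v : Int))
            = (List.range 10).map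
                (fun v : Nat => if v = (pvMaxd s).toNat then pvF xs (v : Int) ++ [s]
                  else pvF xs (v : Int)) :=
          List.map_congr_left (fun v _ => hbuck v)
        rw [hmapeq, haddL, pvModify_map_range _ _ hm10]
        simp
      · have hseen : (decide (0 ≤ pvMaxd s) && !(([] ++ L : List String).contains s)) = false := by
          simp [hmd]
        rw [if_neg hmd, hseen]
        have hbuck : ∀ v : Nat, pvF (xs ++ [s]) (v : Int) = pvF xs (v : Int) := by
          intro v
          rw [hsnocF]
          have hb : (pvMaxd s == (v : Int)) = false := by
            have : pvMaxd s ≠ (v : Int) := by omega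
            simp [this]
          rw [hb]
          simp
        have hmapeq : (List.range 10).map (fun v : Nat => pvF (xs ++ [s]) (v : Int))
            = (List.range 10).map (fun v : Nat => pvF xs (v : Int)) :=
          List.map_congr_left (fun v _ => hbuck v)
        rw [hmapeq]
        simp

-- a digit char is one of '0'..'9'
theorem pvDigit_mem_ten (c : Char) (h : PySem.Chars.isdigit c = true) :
    c ∈ ['0', '1', '2', '3', '4', '5', '6', '7', '8', '9'] := by
  simp only [PySem.Chars.isdigit, Bool.and_eq_true, decide_eq_true_eq] at h
  obtain ⟨h1, h2⟩ := h
  rw [Char.le_def] at h1 h2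
  have g1 := UInt32.le_iff_toNat_le.mp h1
  have g2 := UInt32.le_iff_toNat_le.mp h2
  have e1 : ('0' : Char).val.toNat = 48 := rfl
  have e2 : ('9' : Char).val.toNat = 57 := rfl
  rw [e1] at g1; rw [e2] at g2
  have hcases : c.val.toNat = 48 ∨ c.val.toNat = 49 ∨ c.val.toNat = 50 ∨ c.val.toNat = 51 ∨
      c.val.toNat = 52 ∨ c.val.toNat = 53 ∨ c.val.toNat = 54 ∨ c.val.toNat = 55 ∨
      c.val.toNat = 56 ∨ c.val.toNat = 57 := by omega
  have hof : ∀ d : Char, c.val.toNat = d.val.toNat → c = d :=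
    fun d hd => Char.ext (UInt32.toNat_inj.mp hd)
  rcases hcases with h | h | h | h | h | h | h | h | h | h
  · rw [hof '0' (by rw [h]; rfl)]; decide
  · rw [hof '1' (by rw [h]; rfl)]; decide
  · rw [hof '2' (by rw [h]; rfl)]; decide
  · rw [hof '3' (by rw [h]; rfl)]; decide
  · rw [hof '4' (by rw [h]; rfl)]; decide
  · rw [hof '5' (by rw [h]; rfl)]; decide
  · rw [hof '6' (by rw [h]; rfl)]; decide
  · rw [hof '7' (by rw [h]; rfl)]; decide
  · rw [hof '8' (by rw [h]; rfl)]; decide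
  · rw [hof '9' (by rw [h]; rfl)]; decide

-- every char of a listed string is a char of the '\n'-join
theorem pvMem_join (a : List String) (s : String) (hs : s ∈ a) (c : Char)
    (hc : c ∈ s.toList) : c ∈ (PySem.Str.join "\n" a).toList := by
  rw [PySem.Str.toList_join]
  induction a with
  | nil => simp at hs
  | cons x a ih =>
    rcases List.mem_cons.mp hs with rfl | hs'
    · cases a with
      | nil => simpa [PySem.Chars.join_singleton] using hc
      | cons y rest =>
        simp only [List.map_cons, PySem.Chars.join_cons_cons]
        simp [hc]
    · cases a with
      | nil => simp at hs'
      | cons y rest =>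
        simp only [List.map_cons, PySem.Chars.join_cons_cons]
        have hthis := ih hs'
        simp only [List.map_cons] at hthis
        have e : ("\n" : String).toList = ['\n'] := rfl
        rw [e] at hthis
        simp [hthis]

-- if no digit char occurs in the join, every string's max digit is -1 and all buckets are empty
theorem pvH_nil_of_nodigit (a : List String)
    (h : ∀ s ∈ a, ∀ c ∈ s.toList, PySem.Chars.isdigit c = false) :
    pvH a 10 = [] := by
  have : pvH a (0 + 10) = pvH a 0 := by
    refine pvH_ext a 0 10 (fun j _ hj => ?_)
    refine pvF_nil_of a _ (fun s hs hm => ?_)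
    have hj9 : (j : Int) ≤ 9 := by exact_mod_cast Nat.le_of_lt_succ (by omega)
    have h0 : 0 ≤ pvMaxd s := by rw [hm]; omega
    obtain ⟨c, hc, hcd, _⟩ := pvMaxd_exists s h0
    rw [h s hs c hc] at hcd
    exact absurd hcd (by simp)
  simpa using this

theorem pvB_main (a : List String) :
    sorted_users_alt a = PySem.Str.join "\n" (pvH a 10) := by
  simp only [sorted_users_alt]
  cases hb : ("0123456789").toList.any
      (fun d => PySem.Str.isIn (String.ofList [d]) (PySem.Str.join "\n" a)) with
  | false =>
    rw [if_pos (by rfl)]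
    have hnod : ∀ s ∈ a, ∀ c ∈ s.toList, PySem.Chars.isdigit c = false := by
      intro s hs c hc
      cases hcd : PySem.Chars.isdigit c with
      | false => rfl
      | true =>
        exfalso
        have hmem := pvDigit_mem_ten c hcd
        have hin : PySem.Str.isIn (String.ofList [c]) (PySem.Str.join "\n" a) = true :=
          (pvIsIn_single c _).mpr (pvMem_join a s hs c hc)
        have : ("0123456789").toList.any
            (fun d => PySem.Str.isIn (String.ofList [d]) (PySem.Str.join "\n" a)) = true := by
          refine List.any_eq_true.mpr ⟨c, ?_, hin⟩
          simpa using hmem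
        rw [hb] at this
        exact absurd this (by simp)
    rw [pvH_nil_of_nodigit a hnod]
    rfl
  | true =>
    rw [if_neg (by simp)]
    rw [pvB_state]
    rw [show PySem.List.pyRange 9 (-1) (-1) = [9, 8, 7, 6, 5, 4, 3, 2, 1, 0] from by decide]
    simp only [List.foldl_cons, List.foldl_nil]
    have hget : ∀ k : Nat, k < 10 →
        PySem.List.pyGetD ((List.range 10).map (fun v : Nat => pvF a (v : Int))) (OfNat.ofNat k) []
          = pvF a (k : Int) := by
      intro k hk
      rw [PySem.List.pyGetD_ofNat', PySem.List.getD_map_range _ _ _ _ hk]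
    have e9 := hget 9 (by omega); have e8 := hget 8 (by omega)
    have e7 := hget 7 (by omega); have e6 := hget 6 (by omega)
    have e5 := hget 5 (by omega); have e4 := hget 4 (by omega)
    have e3 := hget 3 (by omega); have e2 := hget 2 (by omega)
    have e1 := hget 1 (by omega); have e0 := hget 0 (by omega)
    norm_num at e9 e8 e7 e6 e5 e4 e3 e2 e1 e0
    rw [e9, e8, e7, e6, e5, e4, e3, e2, e1, e0]
    have hten : pvH a 10
        = [] ++ pvF a 9 ++ pvF a 8 ++ pvF a 7 ++ pvF a 6 ++ pvF a 5 ++ pvF a 4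
            ++ pvF a 3 ++ pvF a 2 ++ pvF a 1 ++ pvF a 0 := by
      norm_num [pvH]
    rw [hten]

-- ===== VERDICT (by name: the statement is the Claim_ definition above) =====
theorem sorted_users_spec : Claim_equal_sorted_users := by
  intro a _
  show sorted_users a = sorted_users_alt a
  rw [pvA_main, pvB_main]
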